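-- pv_equiv track=rewrite | github.com/LinyangHe/Fudan-New_Media_Analysis | Wechat_Friends_Analysis/friends_info_analysis.py | sex_analysis
-- ===== SOURCE A (Python) =====
-- def sex_analysis(friends):
--     male = female = other = 0
--     for i in friends[1:]:
--         sex = i["Sex"]
--         if sex == 1:
--             male += 1
--         elif sex == 2:
--             female += 1
--         else:
--             other += 1
--     return male, female, other
-- ===== SOURCE B (Python) =====
-- def sex_analysis(friends):
--     sexes = [i["Sex"] for i in friends[1:]]
--     male = sexes.count(1)
--     female = sexes.count(2)
--     return male, female, len(sexes) - male - female
-- ===== Notes on version B (the rewrite author's own statement) =====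
-- stated objective: idiomatic
-- what changed: B replaces A's single pass with three running counters and a three-way branch by staged passes: extract the Sex values once, count 1s and 2s with list.count, and derive 'other' arithmetically from the length.
import Mathlib
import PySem

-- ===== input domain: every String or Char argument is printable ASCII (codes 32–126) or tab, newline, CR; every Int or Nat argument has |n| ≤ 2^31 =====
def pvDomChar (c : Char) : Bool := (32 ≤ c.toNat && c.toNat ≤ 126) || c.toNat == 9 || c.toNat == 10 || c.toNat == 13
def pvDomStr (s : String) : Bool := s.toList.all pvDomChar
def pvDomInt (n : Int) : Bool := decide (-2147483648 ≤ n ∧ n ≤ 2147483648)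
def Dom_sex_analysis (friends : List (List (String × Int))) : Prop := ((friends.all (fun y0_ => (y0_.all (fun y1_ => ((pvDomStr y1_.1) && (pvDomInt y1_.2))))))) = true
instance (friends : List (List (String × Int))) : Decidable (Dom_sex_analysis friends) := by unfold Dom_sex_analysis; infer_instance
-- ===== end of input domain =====

-- B replaces A's one-pass three-way branch with three counters by staged passes:
-- extract the Sex values, count 1s and 2s with list.count, derive 'other' arithmetically.

-- ===== PORT A =====
def sex_analysis (friends : List (List (String × Int))) : Int × Int × Int :=
  (PySem.List.slice friends (some 1) none).foldl
    (fun (acc : Int × Int × Int) i =>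
      let sex := (PySem.Dict.get? ⟨i⟩ "Sex").getD 0   -- total form; Pre_ guarantees the key exists
      if sex = 1 then (acc.1 + 1, acc.2.1, acc.2.2)
      else if sex = 2 then (acc.1, acc.2.1 + 1, acc.2.2)
      else (acc.1, acc.2.1, acc.2.2 + 1))
    (0, 0, 0)

-- ===== PORT B =====
def sex_analysis_alt (friends : List (List (String × Int))) : Int × Int × Int :=
  let sexes := (PySem.List.slice friends (some 1) none).map
    (fun i => (PySem.Dict.get? ⟨i⟩ "Sex").getD 0)
  let male : Int := PySem.List.count sexes 1
  let female : Int := PySem.List.count sexes 2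
  (male, female, (sexes.length : Int) - male - female)

-- ===== PRECONDITION & SPEC =====
-- Pre_ excludes exactly the inputs where both Pythons raise KeyError: a friend record
-- past the first without a "Sex" key.
def Pre_sex_analysis (friends : List (List (String × Int))) : Prop :=
  ∀ i ∈ friends.tail, (PySem.Dict.get? (⟨i⟩ : PySem.Dict String Int) "Sex").isSome = true
instance (friends : List (List (String × Int))) : Decidable (Pre_sex_analysis friends) := by
  unfold Pre_sex_analysis; infer_instance

def pvWitness_sex_analysis : (List (List (String × Int))) :=
  [[("Sex", 0)], [("Sex", 1)], [("Sex", 2), ("City", 7)], [("Sex", 3)]]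

def Spec_sex_analysis (friends : List (List (String × Int))) (out : Int × Int × Int) : Prop := out = sex_analysis_alt friends
instance (friends : List (List (String × Int))) (out : Int × Int × Int) : Decidable (Spec_sex_analysis friends out) := by unfold Spec_sex_analysis; infer_instance

-- ===== CLAIM =====
def Claim_equal_sex_analysis : Prop := ∀ (friends : List (List (String × Int))), Dom_sex_analysis friends → Pre_sex_analysis friends → Spec_sex_analysis friends (sex_analysis friends)

-- ===== LEMMAS AND PROOFS =====

-- A's loop characterised by counts over the extracted Sex values.
lemma sexLoop_eq (l : List (List (String × Int))) (m f o : Int) :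
    l.foldl
      (fun (acc : Int × Int × Int) i =>
        let sex := (PySem.Dict.get? ⟨i⟩ "Sex").getD 0
        if sex = 1 then (acc.1 + 1, acc.2.1, acc.2.2)
        else if sex = 2 then (acc.1, acc.2.1 + 1, acc.2.2)
        else (acc.1, acc.2.1, acc.2.2 + 1))
      (m, f, o)
    = (m + (l.map (fun i => (PySem.Dict.get? (⟨i⟩ : PySem.Dict String Int) "Sex").getD 0)).count 1,
       f + (l.map (fun i => (PySem.Dict.get? (⟨i⟩ : PySem.Dict String Int) "Sex").getD 0)).count 2,
       o + ((l.length : Int)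
            - (l.map (fun i => (PySem.Dict.get? (⟨i⟩ : PySem.Dict String Int) "Sex").getD 0)).count 1
            - (l.map (fun i => (PySem.Dict.get? (⟨i⟩ : PySem.Dict String Int) "Sex").getD 0)).count 2)) := by
  induction l generalizing m f o with
  | nil => simp
  | cons x t ih =>
    by_cases h1 : (PySem.Dict.get? (⟨x⟩ : PySem.Dict String Int) "Sex").getD 0 = 1
    · simp [h1, ih]; omega
    · by_cases h2 : (PySem.Dict.get? (⟨x⟩ : PySem.Dict String Int) "Sex").getD 0 = 2
      · simp [h2, ih]; omega
      · simp [h1, h2, ih]; omega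

-- ===== VERDICT =====
theorem sex_analysis_spec : Claim_equal_sex_analysis := by
  intro friends _ _
  unfold Spec_sex_analysis sex_analysis sex_analysis_alt
  rw [sexLoop_eq]
  simp [PySem.List.count]
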